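-- pv_equiv track=rewrite | github.com/finwarman/advent-of-code-2024 | 07/solution.py | reverse_operations
-- ===== SOURCE A (Python) =====
-- def reverse_operations(target, operands, allow_concat=False):
--     if not operands:
--         return target == 0 # valid if we reached 0 after reversing all operations
--
--     current_operand, remaining_operands = operands[-1], operands[:-1]
--
--     # undo add
--     if target >= current_operand: # ensure non-negative after substraction
--         if reverse_operations(target - current_operand, remaining_operands, allow_concat):
--             return True
--
--     # undo multiply
--     if current_operand != 0 and \
--         target % current_operand == 0: # ensure integer & no remainder after division ()
--         if reverse_operations(target // current_operand, remaining_operands, allow_concat):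
--             return True
--
--     # undo concatenation (if allowed):
--     # check if concat of current operand with preceding number could have formed the target.
--     if allow_concat:
--         power = 10 ** len(str(current_operand)) # check if target ends with current_operand (modulo)
--         if target % power == current_operand:
--             new_target = target // power # remove the concatenated part (integer division)
--             if reverse_operations(new_target, remaining_operands, allow_concat):
--                 return True
--
--     # no valid operations can undo the target, return False.
--     return False
-- ===== SOURCE B (Python) =====
-- def reverse_operations(target, operands, allow_concat=False):
--     # Iterative DFS over (remaining target, remaining operand prefix) states.
--     stack = [(target, operands)]
--     while stack:
--         t, ops = stack.pop()
--         if not ops: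
--             if t == 0:
--                 return True
--             continue
--         cur, rest = ops[-1], ops[:-1]
--         if t >= cur:
--             stack.append((t - cur, rest))
--         if cur != 0 and t % cur == 0:
--             stack.append((t // cur, rest))
--         if allow_concat:
--             power = 10 ** len(str(cur))
--             if t % power == cur:
--                 stack.append((t // power, rest))
--     return False
-- ===== Notes on version B (the rewrite author's own statement) =====
-- stated objective: alternative
-- what changed: Replaced A's three-way recursion with an iterative depth-first search over an explicit stack of (target, remaining-operands) states with the same predecessor guards.
import Mathlib
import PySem

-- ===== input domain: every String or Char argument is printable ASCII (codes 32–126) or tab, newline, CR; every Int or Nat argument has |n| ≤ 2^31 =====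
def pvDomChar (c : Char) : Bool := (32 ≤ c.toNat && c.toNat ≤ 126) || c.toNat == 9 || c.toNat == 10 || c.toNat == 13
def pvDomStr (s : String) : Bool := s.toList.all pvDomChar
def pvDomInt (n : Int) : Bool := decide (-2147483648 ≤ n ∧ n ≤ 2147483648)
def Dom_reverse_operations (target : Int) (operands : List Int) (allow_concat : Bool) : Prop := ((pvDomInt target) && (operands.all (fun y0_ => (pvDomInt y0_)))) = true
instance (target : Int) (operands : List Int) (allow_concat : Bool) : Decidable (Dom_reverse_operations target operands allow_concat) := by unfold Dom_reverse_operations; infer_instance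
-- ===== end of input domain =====

-- B replaces A's three-way recursion by an iterative DFS over an explicit stack of states; same guards, same result.
-- ===== PORT A =====
def reverse_operations (target : Int) (operands : List Int) (allow_concat : Bool) : Bool :=
  if hne : operands = [] then decide (target = 0)   -- `if not operands: return target == 0`
  else
    let cur := operands.getLast hne                 -- operands[-1]
    let rem := operands.dropLast                    -- operands[:-1]
    (decide (target ≥ cur) && reverse_operations (target - cur) rem allow_concat) ||
    (decide (cur ≠ 0 ∧ PySem.Int.mod target cur = 0) &&
      reverse_operations (PySem.Int.floordiv target cur) rem allow_concat) ||
    (allow_concat &&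
      decide (PySem.Int.mod target ((10 : Int) ^ (PySem.Int.toChars cur).length) = cur) &&
      reverse_operations (PySem.Int.floordiv target ((10 : Int) ^ (PySem.Int.toChars cur).length)) rem allow_concat)
termination_by operands.length
decreasing_by all_goals
  · have h4 : 0 < operands.length := List.length_pos_iff.mpr hne
    simp [List.length_dropLast]; omega

-- ===== PORT B =====
-- the three guarded pushes done for one popped state (python appends sub, div, concat in this order)
def roPush (c : Bool) (t cur : Int) (rest : List Int) : List (Int × List Int) :=
  (if t ≥ cur then [(t - cur, rest)] else []) ++
  (if cur ≠ 0 ∧ PySem.Int.mod t cur = 0 then [(PySem.Int.floordiv t cur, rest)] else []) ++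
  (if c = true ∧ PySem.Int.mod t ((10 : Int) ^ (PySem.Int.toChars cur).length) = cur then
     [(PySem.Int.floordiv t ((10 : Int) ^ (PySem.Int.toChars cur).length), rest)] else [])

-- stack measure for termination: each state of operand length L weighs 4^L
def roMeasure (stack : List (Int × List Int)) : Nat :=
  (stack.map (fun s => 4 ^ s.2.length)).sum

theorem roPush_measure (c : Bool) (t cur : Int) (rest : List Int) :
    roMeasure (roPush c t cur rest) ≤ 3 * 4 ^ rest.length := by
  unfold roPush roMeasure
  split_ifs <;> simp <;> omega

-- the while-loop: head of the list = top of python's stack (python pushes are prepended reversed)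
def roLoop (c : Bool) (stack : List (Int × List Int)) : Bool :=
  match stack with
  | [] => false
  | (t, ops) :: rest =>
    if hne : ops = [] then
      if t = 0 then true else roLoop c rest
    else
      roLoop c ((roPush c t (ops.getLast hne) ops.dropLast).reverse ++ rest)
termination_by roMeasure stack
decreasing_by
  · simp [roMeasure]
  · have h1 : roMeasure ((roPush c t (ops.getLast hne) ops.dropLast).reverse ++ rest)
        = roMeasure (roPush c t (ops.getLast hne) ops.dropLast) + roMeasure rest := by
      simp [roMeasure, List.sum_reverse]
    have h2 := roPush_measure c t (ops.getLast hne) ops.dropLast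
    have h3 : ops.dropLast.length = ops.length - 1 := List.length_dropLast
    have h4 : 1 ≤ ops.length := List.length_pos_iff.mpr hne
    rw [h3] at h2
    have h5 : 3 * 4 ^ (ops.length - 1) < 4 ^ ops.length := by
      have hp : 0 < 4 ^ (ops.length - 1) := by positivity
      have he : (4:Nat) ^ ops.length = 4 ^ (ops.length - 1) * 4 := by
        rw [← pow_succ]; congr 1; omega
      omega
    have h6 : roMeasure ((t, ops) :: rest) = 4 ^ ops.length + roMeasure rest := by
      simp [roMeasure]
    omega

def reverse_operations_alt (target : Int) (operands : List Int) (allow_concat : Bool) : Bool :=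
  roLoop allow_concat [(target, operands)]

-- ===== PRECONDITION & SPEC =====
def Spec_reverse_operations (target : Int) (operands : List Int) (allow_concat : Bool) (out : Bool) : Prop := out = reverse_operations_alt target operands allow_concat
instance (target : Int) (operands : List Int) (allow_concat : Bool) (out : Bool) : Decidable (Spec_reverse_operations target operands allow_concat out) := by unfold Spec_reverse_operations; infer_instance

-- ===== CLAIM (what is proved, stated in full; the proofs are below) =====
def Claim_equal_reverse_operations : Prop := ∀ (target : Int) (operands : List Int) (allow_concat : Bool), Dom_reverse_operations target operands allow_concat → Spec_reverse_operations target operands allow_concat (reverse_operations target operands allow_concat)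

-- ===== LEMMAS AND PROOFS =====

-- one expansion step of A matches the guarded pushes of B
theorem reverse_operations_node (c : Bool) (t : Int) (ops : List Int) (hne : ops ≠ []) :
    reverse_operations t ops c
      = (roPush c t (ops.getLast hne) ops.dropLast).any (fun s => reverse_operations s.1 s.2 c) := by
  rw [reverse_operations]
  rw [dif_neg hne]
  unfold roPush
  cases c <;> split_ifs <;> by_cases hc : ops.getLast hne = 0 <;> simp_all [Bool.or_assoc]

-- the loop returns true iff some stacked state is solvable in A's sense
theorem roLoop_spec (c : Bool) (stack : List (Int × List Int)) :
    roLoop c stack = stack.any (fun s => reverse_operations s.1 s.2 c) := by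
  fun_induction roLoop c stack with
  | case1 => simp
  | case2 tail =>
    have h0 : reverse_operations 0 [] c = true := by
      rw [reverse_operations]; simp
    simp [List.any_cons, h0]
  | case3 t tail ht ih =>
    have h0 : reverse_operations t [] c = false := by
      rw [reverse_operations]; simp [ht]
    simp [List.any_cons, h0, ih]
  | case4 t ops tail hne ih =>
    rw [ih]
    simp only [List.any_append, List.any_reverse, List.any_cons]
    rw [reverse_operations_node c t ops hne]

-- ===== VERDICT (by name: the statement is the Claim_ definition above) =====
theorem reverse_operations_spec : Claim_equal_reverse_operations := by
  intro target operands allow_concat _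
  unfold Spec_reverse_operations reverse_operations_alt
  rw [roLoop_spec]
  simp
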